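-- pv_equiv track=rewrite | github.com/jagar028055/Market_News_Project | src/personalization/timing_optimizer.py | _identify_peak_windows
-- ===== SOURCE A (Python) =====
-- from typing import Dict, List, Optional, Any, Tuple
--
-- def _identify_peak_windows(hourly_distribution: Dict[int, int]) -> List[Tuple[int, int]]:
--     """ピーク活動時間帯特定"""
--     if not hourly_distribution:
--         return [(9, 10), (18, 19)]  # デフォルト
--
--     # 活動量でソート
--     sorted_hours = sorted(hourly_distribution.items(), key=lambda x: x[1], reverse=True)
--
--     # 上位時間帯を連続区間にグループ化
--     peak_windows = []
--     top_hours = [hour for hour, count in sorted_hours[:6]]  # 上位6時間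
--     top_hours.sort()
--
--     if not top_hours:
--         return [(9, 10), (18, 19)]
--
--     # 連続時間を窓にまとめる
--     current_window_start = top_hours[0]
--     current_window_end = top_hours[0]
--
--     for hour in top_hours[1:]:
--         if hour == current_window_end + 1:
--             current_window_end = hour
--         else:
--             if current_window_end > current_window_start:
--                 peak_windows.append((current_window_start, current_window_end + 1))
--             else:
--                 peak_windows.append((current_window_start, current_window_start + 1))
--             current_window_start = hour
--             current_window_end = hour
--
--     # 最後の窓を追加
--     if current_window_end > current_window_start:
--         peak_windows.append((current_window_start, current_window_end + 1))
--     else: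
--         peak_windows.append((current_window_start, current_window_start + 1))
--
--     return peak_windows[:3]  # 最大3つの窓
-- ===== SOURCE B (Python) =====
-- from typing import Dict, List, Tuple
--
-- def _identify_peak_windows(hourly_distribution: Dict[int, int]) -> List[Tuple[int, int]]:
--     """Reconstruct peak windows from the boundary hours of the top-hour set:
--     a window starts at an hour whose predecessor is not a top hour and ends
--     after an hour whose successor is not a top hour; pair them in order."""
--     if not hourly_distribution:
--         return [(9, 10), (18, 19)]
--     by_count = sorted(hourly_distribution.items(), key=lambda x: x[1], reverse=True)
--     top = {hour for hour, _ in by_count[:6]}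
--     starts = sorted(h for h in top if h - 1 not in top)
--     ends = sorted(h for h in top if h + 1 not in top)
--     return [(s, e + 1) for s, e in zip(starts, ends)][:3]
-- ===== Notes on version B (the rewrite author's own statement) =====
-- stated objective: alternative
-- what changed: A merges consecutive hours sequentially with start/end loop state; B never scans runs at all: it builds the top-hour set and reconstructs the windows from its boundary elements, zipping sorted window starts (hours whose predecessor is not a top hour) with sorted window ends (hours whose successor is not a top hour).
import Mathlib
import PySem

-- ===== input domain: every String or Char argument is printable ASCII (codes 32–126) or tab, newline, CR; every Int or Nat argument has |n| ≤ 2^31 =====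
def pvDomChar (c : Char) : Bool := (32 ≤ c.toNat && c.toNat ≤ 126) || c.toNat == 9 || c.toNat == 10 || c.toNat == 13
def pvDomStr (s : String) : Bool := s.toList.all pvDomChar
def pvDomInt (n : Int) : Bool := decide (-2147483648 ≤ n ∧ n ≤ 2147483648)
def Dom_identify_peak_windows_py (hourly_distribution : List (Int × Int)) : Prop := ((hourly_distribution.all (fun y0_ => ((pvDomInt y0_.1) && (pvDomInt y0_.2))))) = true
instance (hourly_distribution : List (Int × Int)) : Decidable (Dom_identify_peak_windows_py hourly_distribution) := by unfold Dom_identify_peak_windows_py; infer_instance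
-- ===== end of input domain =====

-- B reconstructs the peak windows from the boundary hours of the top-hour set
-- (sorted starts zipped with sorted ends) instead of A's sequential run-merging
-- loop with start/end state (objective: alternative).
-- Pre_ excludes association lists with duplicate keys: the Python argument is a
-- dict, which cannot carry duplicate keys, so the encoding is ambiguous there.


-- ===== PORT A =====
-- A's `for hour in top_hours[1:]` loop with state (peak_windows, current_window_start,
-- current_window_end); the [] case is the trailing "最後の窓を追加" append.
def pvALoop : List Int → List (Int × Int) → Int → Int → List (Int × Int)
  | [], pw, cs, ce =>
      if ce > cs then pw ++ [(cs, ce + 1)] else pw ++ [(cs, cs + 1)]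
  | h :: t, pw, cs, ce =>
      if h = ce + 1 then pvALoop t pw cs h
      else if ce > cs then pvALoop t (pw ++ [(cs, ce + 1)]) h h
      else pvALoop t (pw ++ [(cs, cs + 1)]) h h

def identify_peak_windows_py (hourly_distribution : List (Int × Int)) : List (Int × Int) :=
  if hourly_distribution = [] then [(9, 10), (18, 19)]
  else
    let sorted_hours := PySem.List.sorted hourly_distribution (fun x => x.2) true
    let top_hours := PySem.List.sorted
      ((PySem.List.slice sorted_hours none (some 6)).map (fun p => p.1)) id false
    match top_hours with
    | [] => [(9, 10), (18, 19)]          -- `if not top_hours`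
    | h :: t => (pvALoop t [] h h).take 3  -- start=end=top_hours[0]; peak_windows[:3]

-- ===== PORT B =====
def identify_peak_windows_py_alt (hourly_distribution : List (Int × Int)) : List (Int × Int) :=
  if hourly_distribution = [] then [(9, 10), (18, 19)]
  else
    let by_count := PySem.List.sorted hourly_distribution (fun x => x.2) true
    let top : PySem.Set Int :=
      PySem.Set.ofList ((PySem.List.slice by_count none (some 6)).map (fun p => p.1))
    -- `sorted(h for h in top if …)`: filter the set, then sort (order-independent)
    let starts := PySem.List.sorted
      (top.filter (fun h => !(PySem.Set.contains top (h - 1)))) id false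
    let ends := PySem.List.sorted
      (top.filter (fun h => !(PySem.Set.contains top (h + 1)))) id false
    ((starts.zip ends).map (fun p => (p.1, p.2 + 1))).take 3

-- ===== PRECONDITION & SPEC =====
-- Pre_ excludes association lists with duplicate keys: the Python argument is a dict,
-- which cannot carry duplicate keys, so the list encoding is ambiguous there.
def Pre_identify_peak_windows_py (hourly_distribution : List (Int × Int)) : Prop :=
  (hourly_distribution.map Prod.fst).Nodup
instance (hourly_distribution : List (Int × Int)) : Decidable (Pre_identify_peak_windows_py hourly_distribution) := by unfold Pre_identify_peak_windows_py; infer_instance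

def pvWitness_identify_peak_windows_py : (List (Int × Int)) := [(9, 2), (10, 1), (14, 3)]

def Spec_identify_peak_windows_py (hourly_distribution : List (Int × Int)) (out : List (Int × Int)) : Prop := out = identify_peak_windows_py_alt hourly_distribution
instance (hourly_distribution : List (Int × Int)) (out : List (Int × Int)) : Decidable (Spec_identify_peak_windows_py hourly_distribution out) := by unfold Spec_identify_peak_windows_py; infer_instance

-- ===== CLAIM (what is proved, stated in full; the proofs are below) =====
def Claim_equal_identify_peak_windows_py : Prop := ∀ (hourly_distribution : List (Int × Int)), Dom_identify_peak_windows_py hourly_distribution → Pre_identify_peak_windows_py hourly_distribution → Spec_identify_peak_windows_py hourly_distribution (identify_peak_windows_py hourly_distribution)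

-- ===== LEMMAS AND PROOFS =====

/-- "group consecutive hours into half-open windows", the value of A's loop. -/
def pvWindows (s prev : Int) : List Int → List (Int × Int)
  | [] => [(s, prev + 1)]
  | x :: xs => if x = prev + 1 then pvWindows s x xs else (s, prev + 1) :: pvWindows x x xs

theorem pvALoop_eq_windows (t : List Int) : ∀ pw cs ce, cs ≤ ce →
    pvALoop t pw cs ce = pw ++ pvWindows cs ce t := by
  induction t with
  | nil =>
      intro pw cs ce hle
      by_cases h : ce > cs
      · simp [pvALoop, pvWindows, h]
      · obtain rfl : cs = ce := by omega
        simp [pvALoop, pvWindows]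
  | cons x xs ih =>
      intro pw cs ce hle
      by_cases h : x = ce + 1
      · simp only [pvALoop, if_pos h, pvWindows]
        exact ih pw cs x (by omega)
      · by_cases h2 : ce > cs
        · simp only [pvALoop, if_neg h, if_pos h2, pvWindows]
          rw [ih (pw ++ [(cs, ce + 1)]) x x le_rfl]
          simp
        · obtain rfl : cs = ce := by omega
          simp only [pvALoop, if_neg h, if_neg h2, pvWindows]
          rw [ih (pw ++ [(cs, cs + 1)]) x x le_rfl]
          simp

/-- A's run merging equals B's boundary pairing, over a strictly increasing list. -/
theorem pvWindows_eq_zip (t : List Int) : ∀ (s prev : Int),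
    (prev :: t).Pairwise (· < ·) →
    pvWindows s prev t =
      List.zipWith (fun a b => (a, b + 1))
        (s :: t.filter (fun x => decide ((x - 1) ∉ prev :: t)))
        ((prev :: t).filter (fun x => decide ((x + 1) ∉ prev :: t))) := by
  induction t with
  | nil =>
      intro s prev _
      simp [pvWindows]
  | cons x xs ih =>
      intro s prev hp
      rw [List.pairwise_cons] at hp
      obtain ⟨hprev, hp2⟩ := hp
      have hpx : prev < x := hprev x (by simp)
      have hprevxs : ∀ y ∈ xs, prev < y := fun y hy => hprev y (by simp [hy])
      have hxxs : ∀ y ∈ xs, x < y := (List.pairwise_cons.mp hp2).1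
      have hcong1 : ∀ y ∈ xs,
          decide ((y - 1) ∉ prev :: x :: xs) = decide ((y - 1) ∉ x :: xs) := by
        intro y hy
        have hxy := hxxs y hy
        apply decide_eq_decide.mpr
        simp only [List.mem_cons, not_or]
        constructor
        · rintro ⟨_, h2, h3⟩; exact ⟨h2, h3⟩
        · rintro ⟨h2, h3⟩; exact ⟨by omega, h2, h3⟩
      have hcong2 : ∀ y ∈ x :: xs,
          decide ((y + 1) ∉ prev :: x :: xs) = decide ((y + 1) ∉ x :: xs) := by
        intro y hy
        have hxy : x ≤ y := by
          rcases List.mem_cons.mp hy with h | h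
          · omega
          · exact le_of_lt (hxxs y h)
        apply decide_eq_decide.mpr
        simp only [List.mem_cons, not_or]
        constructor
        · rintro ⟨_, h2, h3⟩; exact ⟨h2, h3⟩
        · rintro ⟨h2, h3⟩; exact ⟨by omega, h2, h3⟩
      by_cases hx : x = prev + 1
      · -- x continues the run starting before prev
        have hs : (x :: xs).filter (fun y => decide ((y - 1) ∉ prev :: x :: xs))
            = xs.filter (fun y => decide ((y - 1) ∉ x :: xs)) := by
          rw [List.filter_cons]
          have : decide ((x - 1 : Int) ∉ prev :: x :: xs) = false := by
            simp only [decide_eq_false_iff_not, not_not, List.mem_cons]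
            left; omega
          rw [this]
          simp only [Bool.false_eq_true, if_false]
          exact List.filter_congr hcong1
        have he : (prev :: x :: xs).filter (fun y => decide ((y + 1) ∉ prev :: x :: xs))
            = (x :: xs).filter (fun y => decide ((y + 1) ∉ x :: xs)) := by
          rw [List.filter_cons]
          have : decide ((prev + 1 : Int) ∉ prev :: x :: xs) = false := by
            simp only [decide_eq_false_iff_not, not_not, List.mem_cons]
            right; left; omega
          rw [this]
          simp only [Bool.false_eq_true, if_false]
          exact List.filter_congr hcong2
        rw [hs, he]
        simp only [pvWindows, if_pos hx]
        subst hx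
        exact ih s (prev + 1) hp2
      · -- a window closes at prev; a new one opens at x
        have hpx1 : prev + 1 < x := by omega
        have hs : (x :: xs).filter (fun y => decide ((y - 1) ∉ prev :: x :: xs))
            = x :: xs.filter (fun y => decide ((y - 1) ∉ x :: xs)) := by
          rw [List.filter_cons]
          have : decide ((x - 1 : Int) ∉ prev :: x :: xs) = true := by
            simp only [decide_eq_true_eq, List.mem_cons, not_or]
            refine ⟨by omega, by omega, fun hmem => ?_⟩
            have := hxxs _ hmem; omega
          rw [this]
          simp only [if_true]
          rw [List.filter_congr hcong1]
        have he : (prev :: x :: xs).filter (fun y => decide ((y + 1) ∉ prev :: x :: xs))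
            = prev :: (x :: xs).filter (fun y => decide ((y + 1) ∉ x :: xs)) := by
          rw [List.filter_cons]
          have : decide ((prev + 1 : Int) ∉ prev :: x :: xs) = true := by
            simp only [decide_eq_true_eq, List.mem_cons, not_or]
            refine ⟨by omega, by omega, fun hmem => ?_⟩
            have := hxxs _ hmem
            have := hprevxs _ hmem; omega
          rw [this]
          simp only [if_true]
          rw [List.filter_congr hcong2]
        rw [hs, he]
        simp only [pvWindows, if_neg hx, List.zipWith_cons_cons]
        congr 1
        exact ih x x hp2

-- ===== VERDICT (by name: the statement is the Claim_ definition above) =====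
theorem identify_peak_windows_py_spec : Claim_equal_identify_peak_windows_py := by
  intro hd _ hpre
  unfold Spec_identify_peak_windows_py identify_peak_windows_py identify_peak_windows_py_alt
  by_cases hnil : hd = []
  · simp [hnil]
  · simp only [if_neg hnil]
    set sh := PySem.List.sorted hd (fun x => x.2) true with hsh
    have hslice : PySem.List.slice sh none (some 6) = sh.take 6 := by
      rw [show ((6 : Int)) = ((6 : Nat) : Int) by norm_num, PySem.List.slice_to_natCast]
    set hours := (PySem.List.slice sh none (some 6)).map (fun p : Int × Int => p.1) with hhours
    have hperm : sh.Perm hd := PySem.List.sorted_perm hd (fun x => x.2) true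
    have hnodupsh : (sh.map Prod.fst).Nodup := ((hperm.map Prod.fst).nodup_iff).mpr hpre
    have hhours' : hours = (sh.map Prod.fst).take 6 := by
      rw [hhours, hslice, List.map_take]
    have hnodup_hours : hours.Nodup := by
      rw [hhours']; exact hnodupsh.sublist (List.take_sublist 6 _)
    have htop : PySem.Set.ofList hours = hours :=
      PySem.Set.ofList_eq_self_of_nodup _ hnodup_hours
    set L := PySem.List.sorted hours id false with hL
    have hpermL : L.Perm hours := PySem.List.sorted_perm hours id false
    have hnodupL : L.Nodup := (hpermL.nodup_iff).mpr hnodup_hours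
    have hlt : L.Pairwise (· < ·) := by
      have hle : L.Pairwise (fun a b => id a ≤ id b) :=
        PySem.List.sorted_pairwise hours id
      exact (hle.and hnodupL).imp (fun h => lt_of_le_of_ne h.1 h.2)
    -- B's starts/ends as filters of the ascending top-hour list L
    have hmemLH : ∀ z : Int, (z ∈ L ↔ z ∈ hours) := fun z => hpermL.mem_iff
    have hfilt : ∀ c : Int,
        PySem.List.sorted
          (List.filter (fun h => !(PySem.Set.contains hours (h + c))) hours) id false
        = L.filter (fun y => decide ((y + c) ∉ L)) := by
      intro c
      apply PySem.List.sorted_eq_of_perm_of_pairwise_lt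
      · have e1 : L.filter (fun y => decide ((y + c) ∉ L))
            = L.filter (fun h => !(PySem.Set.contains hours (h + c))) := by
          apply List.filter_congr
          intro y _
          simp only [PySem.Set.contains_eq_listContains, List.contains_eq_mem]
          simp [decide_not, hmemLH]
        rw [e1]
        exact hpermL.filter _
      · simpa using hlt.filter (fun y => decide ((y + c) ∉ L))
    cases hcase : L with
    | nil =>
        exfalso
        have hlen : L.length ≠ 0 := by
          have hLlen : L.length = hours.length := by
            rw [hL, PySem.List.length_sorted]
          rw [hLlen, hhours', List.length_take, List.length_map]
          have h1 : 0 < sh.length := by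
            rw [hsh, PySem.List.length_sorted]
            exact List.length_pos_iff.mpr hnil
          omega
        rw [hcase] at hlen; simp at hlen
    | cons h t =>
        rw [htop]
        have hstarts := hfilt (-1)
        have hends := hfilt 1
        have hsub : ∀ y : Int, y + (-1) = y - 1 := fun y => by ring
        simp only [hsub] at hstarts
        rw [hstarts, hends, hcase]
        have hheadstart : List.filter (fun y => decide ((y - 1) ∉ h :: t)) (h :: t)
            = h :: List.filter (fun y => decide ((y - 1) ∉ h :: t)) t := by
          rw [List.filter_cons]
          have : decide ((h - 1 : Int) ∉ h :: t) = true := by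
            rw [hcase] at hlt
            have hall := (List.pairwise_cons.mp hlt).1
            simp only [decide_eq_true_eq, List.mem_cons, not_or]
            exact ⟨by omega, fun hmem => by have := hall _ hmem; omega⟩
          rw [this]
          simp
        rw [hheadstart]
        show List.take 3 (pvALoop t [] h h) = _
        rw [pvALoop_eq_windows t [] h h le_rfl, List.nil_append]
        rw [pvWindows_eq_zip t h h (hcase ▸ hlt)]
        congr 1
        simp only [List.zip]
        rw [List.map_zipWith]
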